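-- pv_equiv track=rewrite | github.com/ayiinee/anabool | backend/app/ai/rag/chunking.py | _carry_overlap_parts
-- ===== SOURCE A (Python) =====
-- def _carry_overlap_parts(parts: list[str], overlap_chars: int) -> list[str]:
--     if overlap_chars == 0 or not parts:
--         return []
--
--     kept_parts: list[str] = []
--     collected_length = 0
--
--     for paragraph in reversed(parts):
--         kept_parts.insert(0, paragraph)
--         collected_length = _joined_length(kept_parts)
--         if collected_length >= overlap_chars:
--             break
--
--     return kept_parts
--
-- def _joined_length(parts: list[str]) -> int:
--     return len("\n\n".join(parts))
-- ===== SOURCE B (Python) =====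
-- def _carry_overlap_parts(parts: list[str], overlap_chars: int) -> list[str]:
--     if overlap_chars == 0 or not parts:
--         return []
--     # cumulative joined lengths of the trailing k parts, k = 1..n (strictly increasing)
--     cum = []
--     total = 0
--     for p in reversed(parts):
--         total += len(p) + (2 if cum else 0)
--         cum.append(total)
--     # binary search: first index whose trailing-join length reaches the threshold
--     lo, hi = 0, len(cum)
--     while lo < hi:
--         mid = (lo + hi) // 2
--         if cum[mid] < overlap_chars:
--             lo = mid + 1
--         else:
--             hi = mid
--     k = lo + 1 if lo < len(parts) else len(parts)
--     return parts[len(parts) - k:]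
-- ===== Notes on version B (the rewrite author's own statement) =====
-- stated objective: alternative
-- what changed: Replaces A's backward insert-and-re-join scan (re-joining the kept list with '\n\n' at every step) with a single pass that precomputes the monotone table of trailing joined lengths followed by a binary search for the first index reaching the threshold, then one slice.
import Mathlib
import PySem

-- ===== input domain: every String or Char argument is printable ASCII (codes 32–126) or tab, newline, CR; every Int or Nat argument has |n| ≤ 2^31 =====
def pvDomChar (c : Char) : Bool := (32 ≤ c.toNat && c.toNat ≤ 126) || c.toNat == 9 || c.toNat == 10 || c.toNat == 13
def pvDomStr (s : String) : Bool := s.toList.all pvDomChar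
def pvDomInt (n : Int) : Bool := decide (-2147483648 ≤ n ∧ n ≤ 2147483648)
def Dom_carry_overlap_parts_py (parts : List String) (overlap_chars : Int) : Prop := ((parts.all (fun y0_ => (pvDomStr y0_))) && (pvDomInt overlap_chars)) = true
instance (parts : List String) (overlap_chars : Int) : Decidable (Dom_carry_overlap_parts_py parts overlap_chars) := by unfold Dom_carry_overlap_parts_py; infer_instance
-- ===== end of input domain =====

-- B replaces A's backward insert-and-re-join scan with a precomputed table of
-- trailing joined lengths plus a binary search (objective: alternative algorithm).

-- ===== PORT A =====
-- port of _joined_length: len("\n\n".join(parts))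
def joined_length_py (parts : List String) : Int :=
  PySem.Str.len (PySem.Str.join "\n\n" parts)

-- the 'for paragraph in reversed(parts)' loop: kept.insert(0, p) is cons; 'break' returns kept'
def carryLoopA (overlap_chars : Int) : List String → List String → List String
  | [], kept => kept
  | p :: rest, kept =>
    let kept' := p :: kept
    if joined_length_py kept' ≥ overlap_chars then kept'
    else carryLoopA overlap_chars rest kept'

def carry_overlap_parts_py (parts : List String) (overlap_chars : Int) : List String :=
  if overlap_chars = 0 ∨ parts = [] then []
  else carryLoopA overlap_chars parts.reverse []

-- ===== PORT B =====
-- one step of the cum-building loop: total += len(p) + (2 if cum else 0); cum.append(total)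
def altCumStep (acc : List Int × Int) (p : String) : List Int × Int :=
  (acc.1 ++ [acc.2 + PySem.Str.len p + (if acc.1.isEmpty then 0 else 2)],
   acc.2 + PySem.Str.len p + (if acc.1.isEmpty then 0 else 2))

-- the 'while lo < hi' binary-search loop; cum[mid] is always in range, ported as getD
def altBisect (cum : List Int) (x : Int) (lo hi : Nat) : Nat :=
  if lo < hi then
    if cum.getD ((lo + hi) / 2) 0 < x then altBisect cum x ((lo + hi) / 2 + 1) hi
    else altBisect cum x lo ((lo + hi) / 2)
  else lo
termination_by hi - lo
decreasing_by all_goals omega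

def carry_overlap_parts_py_alt (parts : List String) (overlap_chars : Int) : List String :=
  if overlap_chars = 0 ∨ parts = [] then []
  else
    let cum := (parts.reverse.foldl altCumStep ([], 0)).1
    let lo := altBisect cum overlap_chars 0 cum.length
    let k := if lo < parts.length then lo + 1 else parts.length
    -- parts[len(parts)-k:] with 0 ≤ len-k ≤ len is exactly drop
    parts.drop (parts.length - k)

-- ===== PRECONDITION & SPEC =====
def Spec_carry_overlap_parts_py (parts : List String) (overlap_chars : Int) (out : List String) : Prop := out = carry_overlap_parts_py_alt parts overlap_chars
instance (parts : List String) (overlap_chars : Int) (out : List String) : Decidable (Spec_carry_overlap_parts_py parts overlap_chars out) := by unfold Spec_carry_overlap_parts_py; infer_instance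

-- ===== CLAIM (what is proved, stated in full; the proofs are below) =====
def Claim_equal_carry_overlap_parts_py : Prop := ∀ (parts : List String) (overlap_chars : Int), Dom_carry_overlap_parts_py parts overlap_chars → Spec_carry_overlap_parts_py parts overlap_chars (carry_overlap_parts_py parts overlap_chars)

-- ===== LEMMAS AND PROOFS =====

-- trailing cumulative joined lengths, starting from an already-accumulated total t
def trailCums (t : Int) : List Int → List Int
  | [] => []
  | a :: rest => (t + a + 2) :: trailCums (t + a + 2) rest

def cums : List Int → List Int
  | [] => []
  | a :: rest => a :: trailCums a rest

-- first index whose entry reaches x (list length if none does)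
def firstGe (x : Int) : List Int → Nat
  | [] => 0
  | c :: rest => if x ≤ c then 0 else firstGe x rest + 1

theorem trailCums_length (t : Int) (ls : List Int) : (trailCums t ls).length = ls.length := by
  induction ls generalizing t with
  | nil => rfl
  | cons a rest ih => simp [trailCums, ih]

theorem cums_length (ls : List Int) : (cums ls).length = ls.length := by
  cases ls with
  | nil => rfl
  | cons a rest => simp [cums, trailCums_length]

theorem firstGe_le (x : Int) (l : List Int) : firstGe x l ≤ l.length := by
  induction l with
  | nil => simp [firstGe]
  | cons c rest ih =>
    simp only [firstGe]
    split
    · simp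
    · simp; omega

theorem trailCums_ge (t : Int) (ls : List Int) (h : ∀ a ∈ ls, 0 ≤ a) :
    ∀ c ∈ trailCums t ls, t + 2 ≤ c := by
  induction ls generalizing t with
  | nil => simp [trailCums]
  | cons a rest ih =>
    intro c hc
    simp only [trailCums, List.mem_cons] at hc
    rcases hc with rfl | hc
    · have := h a (by simp); omega
    · have h2 : ∀ b ∈ rest, 0 ≤ b := fun b hb => h b (by simp [hb])
      have := ih (t + a + 2) h2 c hc
      have := h a (by simp)
      omega

theorem trailCums_sorted (t : Int) (ls : List Int) (h : ∀ a ∈ ls, 0 ≤ a) :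
    (trailCums t ls).Pairwise (· ≤ ·) := by
  induction ls generalizing t with
  | nil => simp [trailCums]
  | cons a rest ih =>
    have h2 : ∀ b ∈ rest, 0 ≤ b := fun b hb => h b (by simp [hb])
    refine List.pairwise_cons.mpr ⟨fun c hc => ?_, ih (t + a + 2) h2⟩
    have := trailCums_ge (t + a + 2) rest h2 c hc
    omega

theorem cums_sorted (ls : List Int) (h : ∀ a ∈ ls, 0 ≤ a) :
    (cums ls).Pairwise (· ≤ ·) := by
  cases ls with
  | nil => simp [cums]
  | cons a rest =>
    have h2 : ∀ b ∈ rest, 0 ≤ b := fun b hb => h b (by simp [hb])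
    refine List.pairwise_cons.mpr ⟨fun c hc => ?_, trailCums_sorted a rest h2⟩
    have := trailCums_ge a rest h2 c hc
    omega

-- the invariants at termination pin the answer down uniquely
theorem firstGe_eq_of (x : Int) : ∀ (cum : List Int) (j : Nat), j ≤ cum.length →
    (∀ i < j, cum.getD i 0 < x) →
    (∀ i, j ≤ i → i < cum.length → x ≤ cum.getD i 0) →
    firstGe x cum = j := by
  intro cum
  induction cum with
  | nil =>
    intro j hj _ _
    have : j = 0 := by simpa using hj
    subst this; rfl
  | cons c rest ih =>
    intro j hj h1 h2
    cases j with
    | zero =>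
      have hx : x ≤ c := by simpa using h2 0 (by omega) (by simp)
      simp [firstGe, hx]
    | succ j' =>
      have hcx : c < x := by have := h1 0 (by omega); simpa using this
      simp only [firstGe, if_neg (by omega : ¬ x ≤ c)]
      have : firstGe x rest = j' := by
        refine ih j' (by simpa using hj) (fun i hi => ?_) (fun i hi hlen => ?_)
        · have := h1 (i + 1) (by omega); simpa using this
        · have := h2 (i + 1) (by omega) (by simpa using hlen); simpa using this
      omega

theorem pairwise_getD_le (l : List Int) (hs : l.Pairwise (· ≤ ·)) (i j : Nat)
    (hij : i ≤ j) (hj : j < l.length) : l.getD i 0 ≤ l.getD j 0 := by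
  rcases Nat.lt_or_ge i j with h | h
  · have := (List.pairwise_iff_getElem.mp hs) i j (by omega) hj h
    rwa [List.getD_eq_getElem l 0 (by omega), List.getD_eq_getElem l 0 hj]
  · have : i = j := by omega
    subst this; rfl

theorem altBisect_spec (cum : List Int) (x : Int) (hs : cum.Pairwise (· ≤ ·)) :
    ∀ (n lo hi : Nat), hi - lo ≤ n → lo ≤ hi → hi ≤ cum.length →
    (∀ i < lo, cum.getD i 0 < x) →
    (∀ i, hi ≤ i → i < cum.length → x ≤ cum.getD i 0) →
    altBisect cum x lo hi = firstGe x cum := by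
  intro n
  induction n with
  | zero =>
    intro lo hi hn hlo hhi h1 h2
    have : lo = hi := by omega
    subst this
    rw [altBisect, if_neg (by omega)]
    exact (firstGe_eq_of x cum lo (by omega) h1 h2).symm
  | succ n ih =>
    intro lo hi hn hlo hhi h1 h2
    rw [altBisect]
    by_cases hlt : lo < hi
    · rw [if_pos hlt]
      set mid := (lo + hi) / 2 with hmid
      have hmlo : lo ≤ mid := by omega
      have hmhi : mid < hi := by omega
      by_cases hc : cum.getD mid 0 < x
      · rw [if_pos hc]
        refine ih (mid + 1) hi (by omega) (by omega) hhi (fun i hi' => ?_) h2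
        have : cum.getD i 0 ≤ cum.getD mid 0 :=
          pairwise_getD_le cum hs i mid (by omega) (by omega)
        omega
      · rw [if_neg hc]
        refine ih lo mid (by omega) (by omega) (by omega) h1 (fun i hi' hlen => ?_)
        have : cum.getD mid 0 ≤ cum.getD i 0 := pairwise_getD_le cum hs mid i hi' hlen
        omega
    · rw [if_neg hlt]
      have : lo = hi := by omega
      subst this
      exact (firstGe_eq_of x cum lo (by omega) h1 h2).symm

-- the cum-building fold computes trailCums once the accumulator is nonempty …
theorem fold_trail (rev : List String) : ∀ (acc : List Int) (t : Int), acc ≠ [] →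
    (rev.foldl altCumStep (acc, t)).1 = acc ++ trailCums t (rev.map PySem.Str.len) := by
  induction rev with
  | nil => intro acc t _; simp [trailCums]
  | cons p rest ih =>
    intro acc t hacc
    have hne : acc.isEmpty = false := by simpa [List.isEmpty_iff] using hacc
    simp only [List.foldl_cons, altCumStep, hne, if_neg Bool.false_ne_true]
    rw [ih (acc ++ [t + PySem.Str.len p + 2]) (t + PySem.Str.len p + 2) (by simp)]
    simp [trailCums]

-- … and cums from the empty start
theorem fold_cums (rev : List String) :
    (rev.foldl altCumStep ([], 0)).1 = cums (rev.map PySem.Str.len) := by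
  cases rev with
  | nil => simp [cums]
  | cons p rest =>
    simp only [List.foldl_cons, altCumStep]
    rw [show (([] : List Int) ++ [0 + PySem.Str.len p + (if ([] : List Int).isEmpty then 0 else 2)],
          0 + PySem.Str.len p + (if ([] : List Int).isEmpty then 0 else 2)) =
          ([PySem.Str.len p], PySem.Str.len p) by simp]
    rw [fold_trail rest [PySem.Str.len p] (PySem.Str.len p) (by simp)]
    simp [cums]

-- the joined-length recurrences
theorem jl_singleton (p : String) : joined_length_py [p] = PySem.Str.len p := by
  simp [joined_length_py, PySem.Str.len_eq, PySem.Str.toList_join, PySem.Chars.join_singleton]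

theorem jl_cons_cons (p q : String) (rest : List String) :
    joined_length_py (p :: q :: rest) = PySem.Str.len p + 2 + joined_length_py (q :: rest) := by
  simp only [joined_length_py, PySem.Str.len_eq, PySem.Str.toList_join, List.map_cons,
    PySem.Chars.join_cons_cons]
  have : ("\n\n" : String).toList = ['\n', '\n'] := rfl
  simp [this]
  omega

-- A's loop, once the kept list is nonempty with joined length t
theorem loopA_trail (oc : Int) (rev : List String) : ∀ (kept : List String) (t : Int),
    kept ≠ [] → joined_length_py kept = t →
    carryLoopA oc rev kept =
      (rev.take (min rev.length (firstGe oc (trailCums t (rev.map PySem.Str.len)) + 1))).reverse ++ kept := by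
  induction rev with
  | nil => intro kept t _ _; simp [carryLoopA, trailCums]
  | cons p rest ih =>
    intro kept t hk ht
    obtain ⟨q, kr, rfl⟩ : ∃ q kr, kept = q :: kr := by
      cases kept with | nil => exact absurd rfl hk | cons q kr => exact ⟨q, kr, rfl⟩
    have hjl : joined_length_py (p :: q :: kr) = t + PySem.Str.len p + 2 := by
      rw [jl_cons_cons, ht]; ring
    simp only [carryLoopA, hjl, List.map_cons, trailCums]
    by_cases hge : t + PySem.Str.len p + 2 ≥ oc
    · rw [if_pos hge]
      have hf0 : firstGe oc ((t + PySem.Str.len p + 2) :: trailCums (t + PySem.Str.len p + 2) (rest.map PySem.Str.len)) = 0 := by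
        simp only [firstGe]
        rw [if_pos (show oc ≤ t + PySem.Str.len p + 2 from hge)]
      rw [hf0]
      have hm : min (p :: rest).length (0 + 1) = 1 := by simp
      rw [hm]
      simp
    · rw [if_neg hge]
      have hf : firstGe oc ((t + PySem.Str.len p + 2) :: trailCums (t + PySem.Str.len p + 2) (rest.map PySem.Str.len)) =
          firstGe oc (trailCums (t + PySem.Str.len p + 2) (rest.map PySem.Str.len)) + 1 := by
        simp only [firstGe]
        rw [if_neg (show ¬ oc ≤ t + PySem.Str.len p + 2 from hge)]
      rw [hf, ih (p :: q :: kr) (t + PySem.Str.len p + 2) (by simp) hjl]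
      set f := firstGe oc (trailCums (t + PySem.Str.len p + 2) (rest.map PySem.Str.len)) with hfdef
      have hmin : min (rest.length + 1) (f + 1 + 1) = min rest.length (f + 1) + 1 := by omega
      simp [hmin, List.take_succ_cons]

-- A's loop from the empty kept list
theorem loopA_main (oc : Int) (rev : List String) :
    carryLoopA oc rev [] =
      (rev.take (min rev.length (firstGe oc (cums (rev.map PySem.Str.len)) + 1))).reverse := by
  cases rev with
  | nil => simp [carryLoopA]
  | cons p rest =>
    have hjl : joined_length_py [p] = PySem.Str.len p := jl_singleton p
    simp only [carryLoopA, hjl, List.map_cons, cums]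
    by_cases hge : PySem.Str.len p ≥ oc
    · rw [if_pos hge]
      have hf0 : firstGe oc (PySem.Str.len p :: trailCums (PySem.Str.len p) (rest.map PySem.Str.len)) = 0 := by
        simp only [firstGe]
        rw [if_pos (show oc ≤ PySem.Str.len p from hge)]
      rw [hf0]
      have hm : min (p :: rest).length (0 + 1) = 1 := by simp
      rw [hm]
      simp
    · rw [if_neg hge]
      have hf : firstGe oc (PySem.Str.len p :: trailCums (PySem.Str.len p) (rest.map PySem.Str.len)) =
          firstGe oc (trailCums (PySem.Str.len p) (rest.map PySem.Str.len)) + 1 := by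
        simp only [firstGe]
        rw [if_neg (show ¬ oc ≤ PySem.Str.len p from hge)]
      rw [hf, loopA_trail oc rest [p] (PySem.Str.len p) (by simp) hjl]
      set f := firstGe oc (trailCums (PySem.Str.len p) (rest.map PySem.Str.len)) with hfdef
      have hmin : min (rest.length + 1) (f + 1 + 1) = min rest.length (f + 1) + 1 := by omega
      simp [hmin, List.take_succ_cons]

theorem take_reverse_eq_drop (l : List String) (k : Nat) (_hk : k ≤ l.length) :
    (l.reverse.take k).reverse = l.drop (l.length - k) := by
  rw [List.take_reverse]
  simp

-- ===== VERDICT (by name: the statement is the Claim_ definition above) =====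
theorem carry_overlap_parts_py_spec : Claim_equal_carry_overlap_parts_py := by
  intro parts oc _
  unfold Spec_carry_overlap_parts_py carry_overlap_parts_py carry_overlap_parts_py_alt
  by_cases hz : oc = 0 ∨ parts = []
  · simp [hz]
  · rw [if_neg hz, if_neg hz]
    have hne : parts ≠ [] := fun h => hz (Or.inr h)
    set ls := parts.reverse.map PySem.Str.len with hls
    have hnn : ∀ a ∈ ls, 0 ≤ a := by
      intro a ha
      simp only [hls, List.mem_map] at ha
      obtain ⟨s, _, rfl⟩ := ha
      simp [PySem.Str.len_eq]
    have hcum : (parts.reverse.foldl altCumStep ([], 0)).1 = cums ls := fold_cums parts.reverse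
    dsimp only
    rw [hcum]
    have hlen : (cums ls).length = parts.length := by
      simp [cums_length, hls]
    set n := parts.length with hn
    have hbis : altBisect (cums ls) oc 0 (cums ls).length = firstGe oc (cums ls) :=
      altBisect_spec (cums ls) oc (cums_sorted ls hnn) (cums ls).length 0 (cums ls).length
        (by omega) (by omega) (le_refl _) (by omega) (fun i hi hlen' => by omega)
    rw [hbis]
    set f := firstGe oc (cums ls) with hf
    have hfle : f ≤ n := by rw [hf]; rw [← hlen]; exact firstGe_le oc (cums ls)
    have hn1 : 1 ≤ n := by
      cases parts with
      | nil => exact absurd rfl hne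
      | cons _ _ => simp [hn]
    have hk : (if f < n then f + 1 else n) = min n (f + 1) := by
      split <;> omega
    rw [loopA_main oc parts.reverse]
    have hrl : parts.reverse.length = n := by simp [hn]
    rw [hrl, hk]
    have : parts.reverse.map PySem.Str.len = ls := rfl
    rw [this]
    exact take_reverse_eq_drop parts (min n (f + 1)) (by omega)
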